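-- pv_equiv track=rewrite | github.com/lakospeter91/static-site-generator | src/converter.py | get_number_of_hash_marks
-- ===== SOURCE A (Python) =====
-- def get_number_of_hash_marks(txt):
--     number_of_hash_marks = 0
--     for char in txt:
--         if char == "#":
--             number_of_hash_marks += 1
--         else:
--             break
--     return number_of_hash_marks
-- ===== SOURCE B (Python) =====
-- def get_number_of_hash_marks(txt):
--     return len(txt) - len(txt.lstrip("#"))
-- ===== Notes on version B (the rewrite author's own statement) =====
-- stated objective: idiomatic
-- what changed: Replaces the manual counter loop with break by a single library call: the count is len(txt) minus the length of txt.lstrip('#').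
import Mathlib
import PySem

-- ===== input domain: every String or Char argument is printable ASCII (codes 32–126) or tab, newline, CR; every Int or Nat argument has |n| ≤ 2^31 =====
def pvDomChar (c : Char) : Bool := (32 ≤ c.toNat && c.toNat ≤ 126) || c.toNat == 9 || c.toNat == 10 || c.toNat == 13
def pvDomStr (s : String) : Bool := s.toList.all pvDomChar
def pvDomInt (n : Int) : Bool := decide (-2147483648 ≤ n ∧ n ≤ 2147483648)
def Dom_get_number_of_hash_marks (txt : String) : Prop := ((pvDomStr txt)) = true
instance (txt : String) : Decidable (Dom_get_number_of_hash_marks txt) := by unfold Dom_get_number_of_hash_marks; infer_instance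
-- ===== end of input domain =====

-- B replaces A's counter loop with break by len(txt) - len(txt.lstrip('#')) (idiomatic).

-- ===== PORT A =====
-- A's for-loop with an int counter and break: structural recursion carrying the counter.
def hashLoopA : List Char → Int → Int
  | [], n => n
  | c :: cs, n => if c = '#' then hashLoopA cs (n + 1) else n

def get_number_of_hash_marks (txt : String) : Int :=
  hashLoopA txt.toList 0

-- ===== PORT B =====
-- txt.lstrip("#") ported by hand as dropWhile (· == '#') on the characters (exact:
-- Python's lstrip(chars) removes leading characters drawn from the set {'#'}).
def get_number_of_hash_marks_alt (txt : String) : Int :=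
  (txt.toList.length : Int) - ((txt.toList.dropWhile (· == '#')).length : Int)

-- ===== PRECONDITION & SPEC =====
def Spec_get_number_of_hash_marks (txt : String) (out : Int) : Prop := out = get_number_of_hash_marks_alt txt
instance (txt : String) (out : Int) : Decidable (Spec_get_number_of_hash_marks txt out) := by unfold Spec_get_number_of_hash_marks; infer_instance

-- ===== CLAIM (what is proved, stated in full; the proofs are below) =====
def Claim_equal_get_number_of_hash_marks : Prop := ∀ (txt : String), Dom_get_number_of_hash_marks txt → Spec_get_number_of_hash_marks txt (get_number_of_hash_marks txt)

-- ===== LEMMAS AND PROOFS =====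
theorem hashLoopA_eq (cs : List Char) (n : Int) :
    hashLoopA cs n = n + ((cs.takeWhile (· == '#')).length : Int) := by
  induction cs generalizing n with
  | nil => simp [hashLoopA]
  | cons c cs ih =>
    by_cases h : c = '#'
    · simp [hashLoopA, h, List.takeWhile, ih]; ring
    · simp [hashLoopA, h, List.takeWhile_cons, h]

theorem len_sub_dropWhile (cs : List Char) :
    (cs.length : Int) - ((cs.dropWhile (· == '#')).length : Int)
      = ((cs.takeWhile (· == '#')).length : Int) := by
  have h := List.takeWhile_append_dropWhile (p := (· == '#')) (l := cs)
  have hlen : cs.length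
      = (cs.takeWhile (· == '#')).length + (cs.dropWhile (· == '#')).length := by
    conv_lhs => rw [← h]
    rw [List.length_append]
  omega

-- ===== VERDICT (by name: the statement is the Claim_ definition above) =====
theorem get_number_of_hash_marks_spec : Claim_equal_get_number_of_hash_marks := by
  intro txt _
  unfold Spec_get_number_of_hash_marks get_number_of_hash_marks get_number_of_hash_marks_alt
  rw [hashLoopA_eq, len_sub_dropWhile]
  ring
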